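-- pv_equiv track=rewrite | github.com/Vitaliy-Kalinichenko/python_ADVANCED_hillel | hw_5_Strings_Files.py | remove_words_in_line
-- ===== SOURCE A (Python) =====
-- from string import punctuation
--
-- def remove_words_in_line(line):
--     """This function removes all words from a string containing 3 to 5 characters,
--     in this case, only an even number of such words is deleted."""
--     last_word = ''
--     count_word = 0
--     new_line = []
--     index_last_word = None
--     for word in line:
--         word_without_punct = remove_punctuation(word)  # убираем знаки пунктуации
--         if 3 <= len(word_without_punct) <= 5:
--             last_word = word  # с учетом знаков пунктуации
--             count_word += 1
--             index_last_word = line.index(word, count_word + len(new_line) - 1)  # ндекс с учетом одинаковых слов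
--         else:
--             new_line.append(word)  # с учетом знаков пунктуации
--     if count_word % 2:
--         new_line.insert(index_last_word - count_word + 1, last_word)  # крайнее нечетное слово вставляем в строку под
--         # нужным индексом с учетом удаленных слов
--     return new_line
--
-- def remove_punctuation(word):
--     """This function removes punctuation marks from words"""
--     for punct in punctuation:
--         if punct in word:
--             word = word.replace(punct, '')
--     return word
-- ===== SOURCE B (Python) =====
-- from string import punctuation
--
-- def remove_punctuation(word):
--     """This function removes punctuation marks from words"""
--     for punct in punctuation:
--         if punct in word:
--             word = word.replace(punct, '')
--     return word
--
-- def remove_words_in_line(line):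
--     """Index-table decomposition: first pass records the removable indices,
--     second pass filters, optionally keeping the last removable index when
--     their count is odd."""
--     removable = [i for i, w in enumerate(line) if 3 <= len(remove_punctuation(w)) <= 5]
--     keep = removable[-1] if len(removable) % 2 else None
--     removable_set = set(removable)
--     return [w for i, w in enumerate(line) if i not in removable_set or i == keep]
-- ===== Notes on version B (the rewrite author's own statement) =====
-- stated objective: simpler
-- what changed: Replaces A's single mutating loop (running count, appended kept-list, a line.index rescan to recover the last matching word's position, and a final insert with offset arithmetic) by an index-table decomposition: one pass collects the removable indices, then a filter keeps each word unless its index is removable and is not the retained last odd one.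
import Mathlib
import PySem

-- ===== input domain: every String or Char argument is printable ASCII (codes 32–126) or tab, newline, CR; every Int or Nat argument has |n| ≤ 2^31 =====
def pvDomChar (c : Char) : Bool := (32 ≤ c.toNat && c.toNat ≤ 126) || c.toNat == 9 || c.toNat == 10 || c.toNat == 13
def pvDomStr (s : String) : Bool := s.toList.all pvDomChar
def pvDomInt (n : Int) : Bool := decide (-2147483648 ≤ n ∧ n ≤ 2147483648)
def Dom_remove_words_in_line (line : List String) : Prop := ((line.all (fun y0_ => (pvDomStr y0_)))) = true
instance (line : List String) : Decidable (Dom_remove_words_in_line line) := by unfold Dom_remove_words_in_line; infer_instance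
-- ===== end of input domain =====

-- B replaces A's mutating loop (count/append/line.index/final insert) by an index-table
-- decomposition (collect removable indices, then filter keeping the last one when their
-- count is odd); objective: simpler.
-- ===== PORT A =====
def pvPunctuation : String := "!\"#$%&'()*+,-./:;<=>?@[\\]^_`{|}~"

-- shared helper: both Source A and Source B carry this exact function
def remove_punctuation (word : String) : String :=
  pvPunctuation.toList.foldl (fun w punct =>
    if PySem.Str.isIn (String.singleton punct) w then
      PySem.Str.replace w (String.singleton punct) "" else w) word

-- hand port of xs.index(v, start) (ValueError → none); exact for 0 ≤ start, the only
-- calls in this program (start = current position in the loop, always ≥ 0)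
def pyIndexFrom (xs : List String) (v : String) (start : Int) : Option Int :=
  (PySem.List.index? (xs.drop start.toNat) v).map (fun k => (k : Int) + start)

def remove_words_in_line (line : List String) : List String :=
  let st := line.foldl (fun (st : String × Int × List String × Option Int) word =>
      let lw := st.1; let cw := st.2.1; let nl := st.2.2.1; let il := st.2.2.2
      let wwp := remove_punctuation word
      if 3 ≤ PySem.Str.len wwp ∧ PySem.Str.len wwp ≤ 5 then
        (word, cw + 1, nl, pyIndexFrom line word (cw + 1 + (nl.length : Int) - 1))
      else (lw, cw, nl ++ [word], il))
    ("", 0, [], none)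
  if PySem.Int.mod st.2.1 2 ≠ 0 then
    match st.2.2.2 with
    | some i => PySem.List.insert st.2.2.1 (i - st.2.1 + 1) st.1
    | none => st.2.2.1  -- unreachable: index_last_word is set whenever count_word is odd
  else st.2.2.1

-- ===== PORT B =====
def remove_words_in_line_alt (line : List String) : List String :=
  let removable : List Int :=
    ((PySem.List.enumerate line).filter (fun p =>
      decide (3 ≤ PySem.Str.len (remove_punctuation p.2) ∧
              PySem.Str.len (remove_punctuation p.2) ≤ 5))).map (fun p => p.1)
  let keep : Option Int := if removable.length % 2 = 1 then removable.getLast? else none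
  let removable_set : PySem.Set Int := PySem.Set.ofList removable
  ((PySem.List.enumerate line).filter (fun p =>
    !(PySem.Set.contains removable_set p.1) || some p.1 == keep)).map (fun p => p.2)

-- ===== PRECONDITION & SPEC =====
def Spec_remove_words_in_line (line : List String) (out : List String) : Prop := out = remove_words_in_line_alt line
instance (line : List String) (out : List String) : Decidable (Spec_remove_words_in_line line out) := by unfold Spec_remove_words_in_line; infer_instance

-- ===== CLAIM (what is proved, stated in full; the proofs are below) =====
def Claim_equal_remove_words_in_line : Prop := ∀ (line : List String), Dom_remove_words_in_line line → Spec_remove_words_in_line line (remove_words_in_line line)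
-- ===== LEMMAS AND PROOFS =====

-- predicate "the depunctuated word has 3..5 characters" shared by both loops
def pvP (w : String) : Bool :=
  decide (3 ≤ PySem.Str.len (remove_punctuation w) ∧ PySem.Str.len (remove_punctuation w) ≤ 5)

def pvKept (s : List String) : List String := s.filter (fun w => !pvP w)

-- last pvP-word of s together with its absolute index (s starts at index q)
def pvLast : List String → Int → Option (Int × String)
  | [], _ => none
  | w :: t, q =>
    match pvLast t (q + 1) with
    | some r => some r
    | none => if pvP w then some (q, w) else none

-- indices of the pvP-words of s (s starts at index q)
def pvIdxs : List String → Int → List Int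
  | [], _ => []
  | w :: t, q => (if pvP w then [q] else []) ++ pvIdxs t (q + 1)

-- index-aware filter (spec form of B's second comprehension)
def pvFiltIdx (cond : Int × String → Bool) : List String → Int → List String
  | [], _ => []
  | x :: t, q => (if cond (q, x) then [x] else []) ++ pvFiltIdx cond t (q + 1)



lemma pvLast_eq_none_iff (s : List String) : ∀ q, pvLast s q = none ↔ s.countP pvP = 0 := by
  induction s with
  | nil => simp [pvLast]
  | cons x t ih =>
    intro q
    rw [pvLast]
    cases h : pvLast t (q + 1) with
    | some r =>
      have := (ih (q + 1)).not
      simp [h] at this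
      simp [List.countP_cons, this]
    | none =>
      have h0 := (ih (q + 1)).mp h
      by_cases hp : pvP x = true <;> simp [hp, h0]


lemma pvLast_decomp (s : List String) : ∀ q j w, pvLast s q = some (j, w) →
    ∃ u v, s = u ++ w :: v ∧ j = q + (u.length : Int) ∧ pvP w = true ∧
      ∀ y ∈ v, pvP y = false := by
  induction s with
  | nil => intro q j w h; simp [pvLast] at h
  | cons x t ih =>
    intro q j w h
    rw [pvLast] at h
    cases ht : pvLast t (q + 1) with
    | some r =>
      rw [ht] at h
      simp only [] at h
      obtain ⟨u, v, rfl, hj, hw, hv⟩ := ih (q + 1) j w (by rw [ht]; exact h)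
      refine ⟨x :: u, v, rfl, ?_, hw, hv⟩
      simp only [List.length_cons]
      push_cast
      omega
    | none =>
      rw [ht] at h
      by_cases hp : pvP x = true
      · rw [if_pos hp] at h
        simp only [Option.some.injEq, Prod.mk.injEq] at h
        obtain ⟨rfl, rfl⟩ := h
        refine ⟨[], t, rfl, by simp, hp, ?_⟩
        intro y hy
        have h0 := (pvLast_eq_none_iff t (q + 1)).mp ht
        have := List.countP_eq_zero.mp h0 y hy
        simpa using this
      · simp [hp] at h

lemma pvIdxs_mem (s : List String) : ∀ q i, i ∈ pvIdxs s q ↔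
    ∃ (k : Nat) (h : k < s.length), i = q + (k : Int) ∧ pvP s[k] = true := by
  induction s with
  | nil => simp [pvIdxs]
  | cons x t ih =>
    intro q i
    rw [pvIdxs]
    constructor
    · intro hm
      rcases List.mem_append.mp hm with hm | hm
      · by_cases hp : pvP x = true
        · simp [hp] at hm
          exact ⟨0, by simp, by simp [hm], by simpa using hp⟩
        · simp [hp] at hm
      · obtain ⟨k, hk, rfl, hpk⟩ := (ih (q + 1) i).mp hm
        exact ⟨k + 1, by simpa using hk, by push_cast; ring, by simpa using hpk⟩
    · rintro ⟨k, hk, rfl, hpk⟩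
      cases k with
      | zero =>
        apply List.mem_append.mpr; left
        simp at hpk
        simp [hpk]
      | succ m =>
        apply List.mem_append.mpr; right
        apply (ih (q + 1) _).mpr
        exact ⟨m, by simpa using hk, by push_cast; ring, by simpa using hpk⟩

lemma pvIdxs_length (s : List String) : ∀ q, (pvIdxs s q).length = s.countP pvP := by
  induction s with
  | nil => simp [pvIdxs]
  | cons x t ih =>
    intro q
    rw [pvIdxs]
    by_cases hp : pvP x = true <;> simp [hp, ih]

lemma pvIdxs_eq_nil_iff (s : List String) (q : Int) : pvIdxs s q = [] ↔ pvLast s q = none := by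
  rw [pvLast_eq_none_iff, ← pvIdxs_length s q, List.length_eq_zero_iff]

lemma pvIdxs_getLast? (s : List String) : ∀ q, (pvIdxs s q).getLast? = (pvLast s q).map (·.1) := by
  induction s with
  | nil => simp [pvIdxs, pvLast]
  | cons x t ih =>
    intro q
    rw [pvIdxs, pvLast]
    cases ht : pvLast t (q + 1) with
    | some r =>
      have hne : pvIdxs t (q + 1) ≠ [] := by
        rw [ne_eq, pvIdxs_eq_nil_iff, ht]; simp
      rw [List.getLast?_append_of_ne_nil _ hne, ih, ht]
    | none =>
      have hnil : pvIdxs t (q + 1) = [] := (pvIdxs_eq_nil_iff t (q + 1)).mpr ht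
      rw [hnil]
      by_cases hp : pvP x = true <;> simp [hp]

lemma pvRemovable (s : List String) : ∀ q,
    ((PySem.List.enumerate s q).filter (fun p =>
      decide (3 ≤ PySem.Str.len (remove_punctuation p.2) ∧
              PySem.Str.len (remove_punctuation p.2) ≤ 5))).map (fun p => p.1) = pvIdxs s q := by
  have hfun : (fun p : Int × String =>
      decide (3 ≤ PySem.Str.len (remove_punctuation p.2) ∧
              PySem.Str.len (remove_punctuation p.2) ≤ 5)) = (fun p => pvP p.2) := rfl
  rw [hfun]
  induction s with
  | nil => simp [PySem.List.enumerate_nil, pvIdxs]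
  | cons x t ih =>
    intro q
    rw [PySem.List.enumerate_cons, pvIdxs]
    by_cases hp : pvP x = true
    · simp [hp, ih]
    · simp [hp, ih]

lemma pvFilterEnum (cond : Int × String → Bool) (s : List String) : ∀ q,
    ((PySem.List.enumerate s q).filter cond).map (fun p => p.2) = pvFiltIdx cond s q := by
  induction s with
  | nil => simp [PySem.List.enumerate_nil, pvFiltIdx]
  | cons x t ih =>
    intro q
    rw [PySem.List.enumerate_cons, pvFiltIdx]
    by_cases hc : cond (q, x) = true <;> simp [hc, ih]

lemma pvEven (K : List Int) (s : List String) : ∀ q,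
    (∀ (k : Nat) (h : k < s.length), K.contains (q + (k : Int)) = pvP s[k]) →
    pvFiltIdx (fun p => !(K.contains p.1) || some p.1 == (none : Option Int)) s q = pvKept s := by
  induction s with
  | nil => intro q _; simp [pvFiltIdx, pvKept]
  | cons x t ih =>
    intro q h
    have h0 : K.contains q = pvP x := by simpa using h 0 (by simp)
    rw [pvFiltIdx, ih (q + 1) (fun k hk => by
      have := h (k + 1) (by simpa using Nat.succ_lt_succ hk)
      simpa [add_assoc, add_comm (1 : Int)] using this)]
    by_cases hp : pvP x = true
    · have hq : q ∈ K := List.contains_iff_mem.mp (by rw [h0, hp])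
      simp [pvKept, hp, hq]
    · have hx : pvP x = false := by simpa using hp
      have hq : q ∉ K := by simpa using h0.trans hx
      simp [pvKept, hp, hq]

lemma pvAllKeep (K : List Int) (j : Int) (v : List String) : ∀ q,
    (∀ (k : Nat) (h : k < v.length), K.contains (q + (k : Int)) = false) →
    pvFiltIdx (fun p => !(K.contains p.1) || some p.1 == some j) v q = v := by
  induction v with
  | nil => intro q _; simp [pvFiltIdx]
  | cons x t ih =>
    intro q h
    have h0 : K.contains q = false := by simpa using h 0 (by simp)
    rw [pvFiltIdx, ih (q + 1) (fun k hk => by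
      have h1 := h (k + 1) (by simpa using Nat.succ_lt_succ hk)
      simpa [add_assoc, add_comm (1 : Int)] using h1)]
    have hq : q ∉ K := by simpa using h0
    simp [hq]

lemma pvOdd (K : List Int) (w : String) (v : List String)
    (hv : ∀ y ∈ v, pvP y = false) : ∀ (u : List String) (q j : Int),
    j = q + (u.length : Int) →
    (∀ (k : Nat) (h : k < (u ++ w :: v).length),
      K.contains (q + (k : Int)) = pvP (u ++ w :: v)[k]) →
    pvFiltIdx (fun p => !(K.contains p.1) || some p.1 == some j) (u ++ w :: v) q
      = pvKept u ++ w :: v := by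
  intro u
  induction u with
  | nil =>
    intro q j hj h
    simp only [List.nil_append] at h ⊢
    rw [pvFiltIdx]
    have hj' : j = q := by simpa using hj
    subst hj'
    have htail : pvFiltIdx (fun p => !(K.contains p.1) || some p.1 == some j) v (j + 1) = v := by
      apply pvAllKeep
      intro k hk
      have h1 := h (k + 1) (by simpa using Nat.succ_lt_succ hk)
      simp only [List.getElem_cons_succ] at h1
      have h2 : pvP v[k] = false := hv _ (v.getElem_mem hk)
      rw [h2] at h1
      rw [show j + 1 + (k : Int) = j + ((k : Int) + 1) by ring]
      exact_mod_cast h1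
    simp [pvKept]
    simpa using htail
  | cons x u' ih =>
    intro q j hj h
    simp only [List.cons_append] at h ⊢
    rw [pvFiltIdx]
    have h0 : K.contains q = pvP x := by simpa using h 0 (by simp)
    have hqj : (some q == some j) = false := by
      have : q ≠ j := by
        simp only [List.length_cons] at hj
        push_cast at hj
        omega
      simpa using this
    have htail := ih (q + 1) j
      (by simp only [List.length_cons] at hj; push_cast at hj ⊢; omega)
      (fun k hk => by
        have h1 := h (k + 1) (by simpa using Nat.succ_lt_succ hk)
        simp only [List.getElem_cons_succ] at h1
        rw [show q + 1 + (k : Int) = q + ((k : Int) + 1) by ring]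
        exact_mod_cast h1)
    rw [htail]
    by_cases hp : pvP x = true
    · have hq : q ∈ K := List.contains_iff_mem.mp (by rw [h0, hp])
      simp [pvKept, hp, hq, hqj]
    · have hx : pvP x = false := by simpa using hp
      have hq : q ∉ K := by simpa using h0.trans hx
      simp [pvKept, hp, hq, hqj]

def pvStepA (line : List String) (st : String × Int × List String × Option Int)
    (word : String) : String × Int × List String × Option Int :=
  let lw := st.1; let cw := st.2.1; let nl := st.2.2.1; let il := st.2.2.2
  let wwp := remove_punctuation word
  if 3 ≤ PySem.Str.len wwp ∧ PySem.Str.len wwp ≤ 5 then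
    (word, cw + 1, nl, pyIndexFrom line word (cw + 1 + (nl.length : Int) - 1))
  else (lw, cw, nl ++ [word], il)

lemma pvFoldA (line : List String) : ∀ (s u : List String) (lw : String) (c : Int)
    (nl : List String) (io : Option Int), line = u ++ s →
    c + (nl.length : Int) = (u.length : Int) →
    s.foldl (pvStepA line) (lw, c, nl, io)
    = ((match pvLast s (u.length : Int) with | some r => r.2 | none => lw),
       c + (s.countP pvP : Int),
       nl ++ pvKept s,
       (match pvLast s (u.length : Int) with | some r => some r.1 | none => io)) := by
  intro s
  induction s with
  | nil =>
    intro u lw c nl io hl hc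
    simp only [List.foldl_nil, pvLast, pvKept, List.countP_nil, List.filter_nil,
      List.append_nil, Nat.cast_zero, add_zero]
  | cons x t ih =>
    intro u lw c nl io hl hc
    rw [List.foldl_cons]
    have hstep : pvStepA line (lw, c, nl, io) x
      = if 3 ≤ PySem.Str.len (remove_punctuation x) ∧ PySem.Str.len (remove_punctuation x) ≤ 5 then
          (x, c + 1, nl, pyIndexFrom line x (c + 1 + (nl.length : Int) - 1))
        else (lw, c, nl ++ [x], io) := rfl
    rw [hstep]
    by_cases hp : (3 ≤ PySem.Str.len (remove_punctuation x) ∧ PySem.Str.len (remove_punctuation x) ≤ 5)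
    · rw [if_pos hp]
      have hpb : pvP x = true := decide_eq_true hp
      have hidx : pyIndexFrom line x (c + 1 + (nl.length : Int) - 1) = some (u.length : Int) := by
        have h1 : c + 1 + (nl.length : Int) - 1 = (u.length : Int) := by omega
        rw [h1]
        unfold pyIndexFrom
        rw [Int.toNat_natCast, hl, List.drop_left, PySem.List.index?_cons_self]
        simp
      rw [hidx]
      rw [ih (u ++ [x]) x (c + 1) nl (some (u.length : Int))
        (by rw [hl, List.append_assoc]; rfl)
        (by simp; omega)]
      rw [pvLast]
      have hlen : ((u ++ [x]).length : Int) = (u.length : Int) + 1 := by simp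
      rw [hlen]
      cases hlt : pvLast t ((u.length : Int) + 1) with
      | some r => simp [hpb, pvKept]; omega
      | none => simp [hpb, pvKept]; omega
    · rw [if_neg hp]
      have hpb : pvP x = false := decide_eq_false hp
      rw [ih (u ++ [x]) lw c (nl ++ [x]) io
        (by rw [hl, List.append_assoc]; rfl)
        (by simp; omega)]
      rw [pvLast]
      have hlen : ((u ++ [x]).length : Int) = (u.length : Int) + 1 := by simp
      rw [hlen]
      cases hlt : pvLast t ((u.length : Int) + 1) with
      | some r => simp [hpb, pvKept]
      | none => simp [hpb, pvKept]

lemma pvContainsOfList (K : List Int) (i : Int) :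
    PySem.Set.contains (PySem.Set.ofList K) i = K.contains i := by
  have hb : ∀ b c : Bool, (b = true ↔ c = true) → b = c := by decide
  apply hb
  simp [List.contains_iff_mem, PySem.Set.mem_ofList]

lemma pvKept_length (l : List String) : l.countP pvP + (pvKept l).length = l.length := by
  induction l with
  | nil => simp [pvKept]
  | cons x t ih =>
    by_cases hp : pvP x = true <;>
      simp [pvKept, hp] at ih ⊢ <;> omega

lemma pvContains (s : List String) (k : Nat) (h : k < s.length) :
    (pvIdxs s 0).contains ((0 : Int) + (k : Int)) = pvP s[k] := by
  by_cases hp : pvP s[k] = true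
  · rw [hp]
    exact List.contains_iff_mem.mpr ((pvIdxs_mem s 0 _).mpr ⟨k, h, rfl, hp⟩)
  · have hx : pvP s[k] = false := by simpa using hp
    rw [hx]
    have hnm : ((0 : Int) + (k : Int)) ∉ pvIdxs s 0 := by
      intro hm
      obtain ⟨k', h', heq, hp'⟩ := (pvIdxs_mem s 0 _).mp hm
      have hkk : k' = k := by omega
      subst hkk
      exact absurd hp' (by simp [hx])
    exact Bool.eq_false_iff.mpr (fun hb => hnm (List.contains_iff_mem.mp hb))


-- ===== VERDICT (by name: the statement is the Claim_ definition above) =====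
theorem remove_words_in_line_spec : Claim_equal_remove_words_in_line := by
  intro line _
  unfold Spec_remove_words_in_line
  simp only [remove_words_in_line, remove_words_in_line_alt]
  rw [show (fun (st : String × Int × List String × Option Int) word =>
      let lw := st.1; let cw := st.2.1; let nl := st.2.2.1; let il := st.2.2.2
      let wwp := remove_punctuation word
      if 3 ≤ PySem.Str.len wwp ∧ PySem.Str.len wwp ≤ 5 then
        (word, cw + 1, nl, pyIndexFrom line word (cw + 1 + (nl.length : Int) - 1))
      else (lw, cw, nl ++ [word], il)) = pvStepA line from rfl]
  rw [pvFoldA line line [] "" 0 [] none rfl (by simp)]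
  simp only [List.length_nil, Nat.cast_zero, List.nil_append]
  rw [pvRemovable line 0, pvIdxs_length line 0, pvIdxs_getLast? line 0]
  rw [pvFilterEnum _ line 0]
  have hmod : PySem.Int.mod (0 + (line.countP pvP : Int)) 2
      = ((line.countP pvP % 2 : Nat) : Int) := by
    rw [zero_add]
    rw [PySem.Int.mod_eq_emod_of_pos (by norm_num)]
    push_cast
    rfl
  by_cases hodd : line.countP pvP % 2 = 1
  · -- odd number of removable words
    have hne : pvLast line 0 ≠ none := by
      intro hn
      have := (pvLast_eq_none_iff line 0).mp hn
      omega
    obtain ⟨⟨j, w⟩, hlast⟩ : ∃ r, pvLast line 0 = some r := by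
      cases hl : pvLast line 0 with
      | none => exact absurd hl hne
      | some r => exact ⟨r, rfl⟩
    obtain ⟨u, v, hline, hj, hw, hv⟩ := pvLast_decomp line 0 j w hlast
    subst hline
    have hcv : v.countP pvP = 0 := List.countP_eq_zero.mpr (by intro y hy; simp [hv y hy])
    have hn : (u ++ w :: v).countP pvP = u.countP pvP + 1 := by
      rw [List.countP_append, List.countP_cons, hcv, hw]
      simp
    have hfv : List.filter (fun y => !pvP y) v = v :=
      List.filter_eq_self.mpr (by intro y hy; simp [hv y hy])
    have hkv : pvKept (u ++ w :: v) = pvKept u ++ v := by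
      unfold pvKept
      rw [List.filter_append]
      have hwv : List.filter (fun y => !pvP y) (w :: v) = v := by
        rw [List.filter_cons]
        simp [hw, hfv]
      rw [hwv]
    rw [hlast]
    rw [if_pos (by rw [hmod, hodd]; norm_num)]
    rw [if_pos hodd]
    simp only [Option.map_some]
    simp only [pvContainsOfList]
    rw [pvOdd (pvIdxs (u ++ w :: v) 0) w v hv u 0 j (by simpa using hj)
      (fun k hk => pvContains (u ++ w :: v) k hk)]
    have h2 : u.countP pvP ≤ u.length := List.countP_le_length
    have h1 : (pvKept u).length = u.length - u.countP pvP := by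
      have h3 := pvKept_length u
      omega
    have hpos : j - (0 + (((u ++ w :: v).countP pvP : Nat) : Int)) + 1
        = ((pvKept u).length : Int) := by
      rw [hn, hj, h1, Nat.cast_sub h2]
      push_cast
      omega
    rw [hkv, hpos, PySem.List.insert_natCast _ _ _ (by simp), List.take_left, List.drop_left]
  · -- even number of removable words
    rw [if_neg (by rw [hmod]; simp; omega)]
    rw [if_neg hodd]
    simp only [pvContainsOfList]
    rw [pvEven (pvIdxs line 0) line 0 (fun k hk => pvContains line k hk)]
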